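-- pv_equiv track=rewrite | github.com/gnsalok/algo-ds-python | Leetcode-python/Interview/maxTeamDiff.py | teams
-- ===== SOURCE A (Python) =====
-- from typing import List
--
-- def teams(arr: List[int], size: int, diff: int) -> int:
--     n = len(arr)
--     res = 0
--
--     for i in range(0,n):
--         ll , ls = 0, 0
--         rl , rs = 0, 0
--         for j in range(0,i):
--             if(arr[j] > arr[i]):
--                 ll += 1
--             if(arr[j] < arr[i]):
--                 ls += 1
--         for j in range(i+1, n):
--             if(arr[j]>arr[i]):
--                 rl += 1
--             if(arr[j] < arr[i]):
--                 rs += 1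
--         res += (ls * rl) + (rs * ll)
--     return res
-- ===== SOURCE B (Python) =====
-- def teams(arr, size, diff):
--     # Binary search: first index in sorted list a whose element is >= v
--     # (identical to the standard bisect_left loop; bl(a, v + 1) is bisect_right
--     # for integers, i.e. the number of elements <= v).
--     def bl(a, v):
--         lo, hi = 0, len(a)
--         while lo < hi:
--             mid = (lo + hi) // 2
--             if a[mid] < v:
--                 lo = mid + 1
--             else:
--                 hi = mid
--         return lo
--
--     n = len(arr)
--     s = sorted(arr)
--     res = 0
--     left = []
--     for v in arr:
--         tl = bl(s, v)                   # elements < v in the whole list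
--         tg = n - bl(s, v + 1)           # elements > v in the whole list
--         ls = bl(left, v)                # elements < v before current position
--         ll = len(left) - bl(left, v + 1)  # elements > v before current position
--         res += ls * (tg - ll) + (tl - ls) * ll
--         left.insert(bl(left, v + 1), v)  # keep the prefix sorted
--     return res
-- ===== Notes on version B (the rewrite author's own statement) =====
-- stated objective: faster
-- what changed: Replaces A's per-element nested left/right scans (O(n^2)) by one pass that keeps a sorted prefix: binary search gives the smaller/greater counts on the left, and the right-side counts are derived by subtracting them from whole-array counts obtained by binary search in sorted(arr).
import Mathlib
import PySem

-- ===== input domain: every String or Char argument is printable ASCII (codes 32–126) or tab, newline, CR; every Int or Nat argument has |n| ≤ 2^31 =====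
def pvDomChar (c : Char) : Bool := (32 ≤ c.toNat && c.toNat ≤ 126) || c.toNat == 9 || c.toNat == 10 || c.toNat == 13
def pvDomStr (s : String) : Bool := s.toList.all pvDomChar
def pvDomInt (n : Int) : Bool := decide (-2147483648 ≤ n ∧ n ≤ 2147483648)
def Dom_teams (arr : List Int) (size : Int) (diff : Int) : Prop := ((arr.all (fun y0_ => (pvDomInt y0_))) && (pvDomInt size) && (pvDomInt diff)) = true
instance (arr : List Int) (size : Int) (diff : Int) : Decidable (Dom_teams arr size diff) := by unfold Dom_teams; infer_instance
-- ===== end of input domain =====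

-- B replaces A's nested left/right scans by one pass over a sorted prefix with binary
-- search, deriving the right-side counts from whole-array counts (objective: faster).

-- ===== PORT A =====
-- Literal port of A: for each i, scan the elements before i and after i, counting
-- smaller/larger ones, and accumulate ls*rl + rs*ll.  All indices produced by the
-- ranges are in bounds, so arr.getD j 0 is exactly Python's arr[j] here.
def teams (arr : List Int) (size : Int) (diff : Int) : Int :=
  let n := arr.length
  (List.range n).foldl (fun res i =>
    let ai := arr.getD i 0
    let lp := (List.range i).foldl (fun (p : Int × Int) j =>
        let aj := arr.getD j 0
        let p := if aj > ai then (p.1 + 1, p.2) else p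
        if aj < ai then (p.1, p.2 + 1) else p) (0, 0)
    let rp := (List.range' (i + 1) (n - (i + 1))).foldl (fun (p : Int × Int) j =>
        let aj := arr.getD j 0
        let p := if aj > ai then (p.1 + 1, p.2) else p
        if aj < ai then (p.1, p.2 + 1) else p) (0, 0)
    res + (lp.2 * rp.1 + rp.2 * lp.1)) 0

-- ===== PORT B =====
-- Literal port of Source B.  Its helper bl is the standard bisect_left lo/hi binary-search
-- loop, ported as PySem.List.bisectLeft (the same loop); bl(a, v+1) is bisect_right for
-- integers.  left.insert(i, v) is PySem.List.insert.
def teams_alt (arr : List Int) (size : Int) (diff : Int) : Int :=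
  let n := arr.length
  let s := PySem.List.sorted arr (fun x => x) false
  (arr.foldl (fun (st : Int × List Int) v =>
      let res := st.1
      let left := st.2
      let tl : Int := PySem.List.bisectLeft s v
      let tg : Int := (n : Int) - (PySem.List.bisectLeft s (v + 1) : Int)
      let ls : Int := PySem.List.bisectLeft left v
      let ll : Int := (left.length : Int) - (PySem.List.bisectLeft left (v + 1) : Int)
      let res := res + ls * (tg - ll) + (tl - ls) * ll
      (res, PySem.List.insert left ((PySem.List.bisectLeft left (v + 1) : Nat) : Int) v))
    ((0 : Int), ([] : List Int))).1

-- ===== PRECONDITION & SPEC =====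
def Spec_teams (arr : List Int) (size : Int) (diff : Int) (out : Int) : Prop := out = teams_alt arr size diff
instance (arr : List Int) (size : Int) (diff : Int) (out : Int) : Decidable (Spec_teams arr size diff out) := by unfold Spec_teams; infer_instance

-- ===== CLAIM (what is proved, stated in full; the proofs are below) =====
def Claim_equal_teams : Prop := ∀ (arr : List Int) (size : Int) (diff : Int), Dom_teams arr size diff → Spec_teams arr size diff (teams arr size diff)

-- ===== LEMMAS AND PROOFS =====

-- number of elements < v, resp. > v
def cntLT (l : List Int) (v : Int) : Int := (l.countP (fun x => decide (x < v)) : Int)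
def cntGT (l : List Int) (v : Int) : Int := (l.countP (fun x => decide (v < x)) : Int)

-- common functional spec: the contribution of each element, structurally over the list
def Tcnt : List Int → List Int → Int
  | _, [] => 0
  | pre, v :: suf =>
      cntLT pre v * cntGT suf v + cntLT suf v * cntGT pre v + Tcnt (pre ++ [v]) suf

-- A's inner loop counts larger/smaller elements of the scanned segment
lemma pairFold (ai : Int) (arr : List Int) : ∀ (js : List Nat) (a b : Int),
    js.foldl (fun (p : Int × Int) j =>
        let aj := arr.getD j 0
        let p := if aj > ai then (p.1 + 1, p.2) else p
        if aj < ai then (p.1, p.2 + 1) else p) (a, b)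
      = (a + cntGT (js.map (fun j => arr.getD j 0)) ai,
         b + cntLT (js.map (fun j => arr.getD j 0)) ai) := by
  intro js
  induction js with
  | nil => intro a b; simp [cntGT, cntLT]
  | cons j js ih =>
    intro a b
    simp only [List.foldl_cons, List.map_cons]
    rcases lt_trichotomy (arr.getD j 0) ai with h | h | h
    · rw [if_neg (not_lt.mpr (le_of_lt h)), if_pos h, ih]
      simp only [cntGT, cntLT, List.countP_cons, decide_eq_true_eq,
        if_pos h, if_neg (not_lt.mpr (le_of_lt h)), Prod.ext_iff]
      constructor <;> push_cast <;> ring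
    · rw [if_neg (not_lt.mpr (le_of_eq h.symm)), if_neg (not_lt.mpr (le_of_eq h)), ih]
      simp only [cntGT, cntLT, List.countP_cons, decide_eq_true_eq,
        if_neg (not_lt.mpr (le_of_eq h.symm)), if_neg (not_lt.mpr (le_of_eq h)), Prod.ext_iff]
      constructor <;> push_cast <;> ring
    · rw [if_pos h, if_neg (not_lt.mpr (le_of_lt h)), ih]
      simp only [cntGT, cntLT, List.countP_cons, decide_eq_true_eq,
        if_pos h, if_neg (not_lt.mpr (le_of_lt h)), Prod.ext_iff]
      constructor <;> push_cast <;> ring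

-- indices a, a+1, …, a+k-1 read through getD are the corresponding segment
lemma map_getD_range' (l : List Int) : ∀ (k a : Nat), a + k ≤ l.length →
    (List.range' a k).map (fun j => l.getD j 0) = (l.drop a).take k := by
  intro k
  induction k with
  | zero => intro a _; simp
  | succ k ih =>
    intro a h
    have ha : a < l.length := by omega
    rw [List.range'_succ, List.map_cons, ih (a + 1) (by omega)]
    rw [List.drop_eq_getElem_cons ha, List.take_succ_cons]
    simp [List.getD_eq_getElem?_getD, ha]

lemma map_getD_range (l : List Int) (i : Nat) (h : i ≤ l.length) :
    (List.range i).map (fun j => l.getD j 0) = l.take i := by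
  rw [List.range_eq_range', map_getD_range' l i 0 (by omega)]
  simp

-- bisectLeft on a sorted list is the number of elements < v
lemma bl_count (l : List Int) (v : Int) (h : l.Pairwise (· ≤ ·)) :
    (PySem.List.bisectLeft l v : Int) = cntLT l v := by
  obtain ⟨hle, hlt, hge⟩ := PySem.List.bisectLeft_spec l v h
  set r := PySem.List.bisectLeft l v with hr
  have hsplit : l.countP (fun x => decide (x < v)) = r := by
    have h1 : (l.take r).countP (fun x => decide (x < v)) = (l.take r).length := by
      rw [List.countP_eq_length]
      intro a ha
      obtain ⟨j, hj, rfl⟩ := List.mem_iff_getElem.mp ha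
      have hjl : j < l.length := by simp [List.length_take] at hj; omega
      have hjr : j < r := by simp [List.length_take] at hj; omega
      simp only [List.getElem_take, decide_eq_true_eq]
      exact hlt j hjl hjr
    have h2 : (l.drop r).countP (fun x => decide (x < v)) = 0 := by
      rw [List.countP_eq_zero]
      intro a ha
      obtain ⟨j, hj, rfl⟩ := List.mem_iff_getElem.mp ha
      have hjl : r + j < l.length := by simp [List.length_drop] at hj; omega
      have := hge (r + j) hjl (by omega)
      simp only [List.getElem_drop, decide_eq_true_eq, Bool.not_eq_true] at *
      omega
    calc l.countP (fun x => decide (x < v))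
        = (l.take r ++ l.drop r).countP (fun x => decide (x < v)) := by rw [List.take_append_drop]
      _ = r := by rw [List.countP_append, h1, h2, List.length_take]; omega
  simp [cntLT, hsplit]

-- bisectLeft at v+1 counts the elements ≤ v
lemma bl1_count (l : List Int) (v : Int) (h : l.Pairwise (· ≤ ·)) :
    (PySem.List.bisectLeft l (v + 1) : Int) = (l.countP (fun x => decide (x ≤ v)) : Int) := by
  rw [bl_count l (v + 1) h]
  simp only [cntLT]
  congr 1
  apply List.countP_congr
  intro x _
  simp [Int.lt_add_one_iff]

-- length minus the count of ≤ v is the count of > v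
lemma length_sub_countP_le (l : List Int) (v : Int) :
    (l.length : Int) - (l.countP (fun x => decide (x ≤ v)) : Int) = cntGT l v := by
  have hlen := List.length_eq_countP_add_countP (l := l) (p := fun x => decide (x ≤ v))
  have hc : l.countP (fun x => decide ¬(decide (x ≤ v)) = true) = l.countP (fun x => decide (v < x)) := by
    apply List.countP_congr; intro x _; simp [not_le]
  rw [hc] at hlen
  simp only [cntGT]
  omega

-- the sorted-prefix insertion: permutation and sortedness are preserved
lemma insert_sorted_perm (l : List Int) (v : Int) (h : l.Pairwise (· ≤ ·)) :
    (l.take (PySem.List.bisectLeft l (v + 1)) ++ v :: l.drop (PySem.List.bisectLeft l (v + 1))).Perm (v :: l) := by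
  have h1 : (l.take (PySem.List.bisectLeft l (v + 1)) ++ v :: l.drop (PySem.List.bisectLeft l (v + 1))).Perm
      (v :: (l.take (PySem.List.bisectLeft l (v + 1)) ++ l.drop (PySem.List.bisectLeft l (v + 1)))) :=
    List.perm_middle
  rwa [List.take_append_drop] at h1

lemma insert_sorted_pairwise (l : List Int) (v : Int) (h : l.Pairwise (· ≤ ·)) :
    (l.take (PySem.List.bisectLeft l (v + 1)) ++ v :: l.drop (PySem.List.bisectLeft l (v + 1))).Pairwise (· ≤ ·) := by
  obtain ⟨hle, hlt, hge⟩ := PySem.List.bisectLeft_spec l (v + 1) h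
  set r := PySem.List.bisectLeft l (v + 1) with hr
  have htake : ∀ x ∈ l.take r, x ≤ v := by
    intro x hx
    obtain ⟨j, hj, rfl⟩ := List.mem_iff_getElem.mp hx
    rw [List.getElem_take]
    have := hlt j (by simp at hj; omega) (by simp at hj; omega)
    omega
  have hdrop : ∀ y ∈ l.drop r, v < y := by
    intro y hy
    obtain ⟨j, hj, rfl⟩ := List.mem_iff_getElem.mp hy
    rw [List.getElem_drop]
    have := hge (r + j) (by simp at hj; omega) (by omega)
    omega
  rw [List.pairwise_append]
  refine ⟨h.sublist (List.take_sublist r l), ?_, ?_⟩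
  · rw [List.pairwise_cons]
    exact ⟨fun y hy => le_of_lt (hdrop y hy), h.sublist (List.drop_sublist r l)⟩
  · intro x hx y hy
    rcases List.mem_cons.mp hy with rfl | hy
    · exact htake x hx
    · exact le_of_lt ((htake x hx).trans_lt (hdrop y hy))

-- A's outer loop, from an arbitrary split point, computes Tcnt
lemma teamsA_loop (arr : List Int) : ∀ (suf pre : List Int) (res : Int), arr = pre ++ suf →
    (List.range' pre.length suf.length).foldl (fun res i =>
      let ai := arr.getD i 0
      let lp := (List.range i).foldl (fun (p : Int × Int) j =>
          let aj := arr.getD j 0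
          let p := if aj > ai then (p.1 + 1, p.2) else p
          if aj < ai then (p.1, p.2 + 1) else p) (0, 0)
      let rp := (List.range' (i + 1) (arr.length - (i + 1))).foldl (fun (p : Int × Int) j =>
          let aj := arr.getD j 0
          let p := if aj > ai then (p.1 + 1, p.2) else p
          if aj < ai then (p.1, p.2 + 1) else p) (0, 0)
      res + (lp.2 * rp.1 + rp.2 * lp.1)) res = res + Tcnt pre suf := by
  intro suf
  induction suf with
  | nil => intro pre res _; simp [Tcnt]
  | cons v suf ih =>
    intro pre res harr
    have hlen : arr.length = pre.length + 1 + suf.length := by subst harr; simp; omega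
    simp only [List.length_cons]
    rw [List.range'_succ, List.foldl_cons]
    have hai : arr.getD pre.length 0 = v := by
      subst harr
      rw [List.getD_eq_getElem?_getD, List.getElem?_append_right (le_refl _)]
      simp
    have htake : arr.take pre.length = pre := by subst harr; simp
    have hdrop : arr.drop (pre.length + 1) = suf := by
      have : arr = (pre ++ [v]) ++ suf := by subst harr; simp
      rw [this]
      have : (pre ++ [v]).length = pre.length + 1 := by simp
      rw [← this, List.drop_left]
    have h1 : (List.range pre.length).map (fun j => arr.getD j 0) = pre := by
      rw [map_getD_range arr pre.length (by omega), htake]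
    have h2 : (List.range' (pre.length + 1) (arr.length - (pre.length + 1))).map (fun j => arr.getD j 0) = suf := by
      have hk : arr.length - (pre.length + 1) = suf.length := by omega
      rw [hk, map_getD_range' arr suf.length (pre.length + 1) (by omega), hdrop]
      simp
    simp only [hai]
    rw [show (List.range pre.length).foldl (fun (p : Int × Int) j =>
          let aj := arr.getD j 0
          let p := if aj > v then (p.1 + 1, p.2) else p
          if aj < v then (p.1, p.2 + 1) else p) (0, 0)
        = ((0 : Int) + cntGT ((List.range pre.length).map (fun j => arr.getD j 0)) v,
           (0 : Int) + cntLT ((List.range pre.length).map (fun j => arr.getD j 0)) v)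
      from pairFold v _ _ 0 0]
    rw [show (List.range' (pre.length + 1) (arr.length - (pre.length + 1))).foldl (fun (p : Int × Int) j =>
          let aj := arr.getD j 0
          let p := if aj > v then (p.1 + 1, p.2) else p
          if aj < v then (p.1, p.2 + 1) else p) (0, 0)
        = ((0 : Int) + cntGT ((List.range' (pre.length + 1) (arr.length - (pre.length + 1))).map (fun j => arr.getD j 0)) v,
           (0 : Int) + cntLT ((List.range' (pre.length + 1) (arr.length - (pre.length + 1))).map (fun j => arr.getD j 0)) v)
      from pairFold v _ _ 0 0]
    rw [h1, h2]
    have hpre1 : (pre ++ [v]).length = pre.length + 1 := by simp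
    have := ih (pre ++ [v]) (res + (cntLT pre v * cntGT suf v + cntLT suf v * cntGT pre v)) (by subst harr; simp)
    rw [hpre1] at this
    simp only [zero_add]
    rw [this, Tcnt]
    ring

-- B's loop, from an arbitrary split point, computes Tcnt
lemma teamsB_loop (arr s : List Int) (n : Nat) (hs : s.Pairwise (· ≤ ·)) (hsp : s.Perm arr)
    (hn : n = arr.length) :
    ∀ (suf pre : List Int) (res : Int) (left : List Int),
    arr = pre ++ suf → left.Perm pre → left.Pairwise (· ≤ ·) →
    (suf.foldl (fun (st : Int × List Int) v =>
      let res := st.1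
      let left := st.2
      let tl : Int := PySem.List.bisectLeft s v
      let tg : Int := (n : Int) - (PySem.List.bisectLeft s (v + 1) : Int)
      let ls : Int := PySem.List.bisectLeft left v
      let ll : Int := (left.length : Int) - (PySem.List.bisectLeft left (v + 1) : Int)
      let res := res + ls * (tg - ll) + (tl - ls) * ll
      (res, PySem.List.insert left ((PySem.List.bisectLeft left (v + 1) : Nat) : Int) v))
      (res, left)).1 = res + Tcnt pre suf := by
  intro suf
  induction suf with
  | nil => intro pre res left _ _ _; simp [Tcnt]
  | cons v suf ih =>
    intro pre res left harr hperm hsort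
    rw [List.foldl_cons]
    obtain ⟨hle, _, _⟩ := PySem.List.bisectLeft_spec left (v + 1) hsort
    have hcntLT_s : (PySem.List.bisectLeft s v : Int) = cntLT arr v := by
      rw [bl_count s v hs]; simp only [cntLT]; rw [hsp.countP_eq]
    have hcntLE_s : (PySem.List.bisectLeft s (v + 1) : Int) = (arr.countP (fun x => decide (x ≤ v)) : Int) := by
      rw [bl1_count s v hs]; rw [hsp.countP_eq]
    have hls : (PySem.List.bisectLeft left v : Int) = cntLT pre v := by
      rw [bl_count left v hsort]; simp only [cntLT]; rw [hperm.countP_eq]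
    have hll : (left.length : Int) - (PySem.List.bisectLeft left (v + 1) : Int) = cntGT pre v := by
      rw [bl1_count left v hsort, hperm.countP_eq, hperm.length_eq]
      exact length_sub_countP_le pre v
    have htl : (PySem.List.bisectLeft s v : Int) = cntLT pre v + cntLT suf v := by
      rw [hcntLT_s]; subst harr
      simp [cntLT, List.countP_append, List.countP_cons]
    have htg : (n : Int) - (PySem.List.bisectLeft s (v + 1) : Int) = cntGT pre v + cntGT suf v := by
      rw [hcntLE_s, hn, length_sub_countP_le arr v]
      subst harr
      simp [cntGT, List.countP_append, List.countP_cons]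
    have hins : PySem.List.insert left ((PySem.List.bisectLeft left (v + 1) : Nat) : Int) v
        = left.take (PySem.List.bisectLeft left (v + 1)) ++ v :: left.drop (PySem.List.bisectLeft left (v + 1)) :=
      PySem.List.insert_natCast left _ v hle
    have hperm' : (left.take (PySem.List.bisectLeft left (v + 1)) ++ v :: left.drop (PySem.List.bisectLeft left (v + 1))).Perm (pre ++ [v]) :=
      ((insert_sorted_perm left v hsort).trans (hperm.cons v)).trans (List.perm_append_singleton v pre).symm
    simp only
    rw [hins]
    rw [ih (pre ++ [v]) _ _ (by subst harr; simp) hperm' (insert_sorted_pairwise left v hsort)]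
    rw [Tcnt]
    rw [hls, htl, htg, hll]
    ring

-- ===== VERDICT (by name: the statement is the Claim_ definition above) =====
theorem teams_spec : Claim_equal_teams := by
  intro arr size diff _
  unfold Spec_teams teams teams_alt
  have hA := teamsA_loop arr arr [] 0 (by simp)
  have hB := teamsB_loop arr (PySem.List.sorted arr (fun x => x) false) arr.length
    (by simpa using PySem.List.sorted_pairwise arr (fun x => x))
    (PySem.List.sorted_perm arr (fun x => x) false) rfl arr [] 0 [] (by simp) (List.Perm.refl _) List.Pairwise.nil
  simp only [List.length_nil] at hA
  rw [← List.range_eq_range'] at hA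
  simp only at hA hB ⊢
  rw [hA, hB]
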